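-- pv_equiv track=rewrite | github.com/tinatsaitp/2020-Fall | test03.py | cleanedup
-- ===== SOURCE A (Python) =====
-- def cleanedup(s):
--     letters = '@abcdefghijklmnopqrstuvwxyz'
--     cleantext = ''
--     for character in s.lower():
--         if character in letters:
--             cleantext += character
--         else:
--             cleantext += ' '
--     return cleantext
-- ===== SOURCE B (Python) =====
-- import re
--
-- def cleanedup(s):
--     return re.sub(r'[^@a-z]', ' ', s.lower())
-- ===== Notes on version B (the rewrite author's own statement) =====
-- stated objective: idiomatic
-- what changed: Replaces the character-by-character loop with string concatenation by a single regex substitution re.sub(r'[^@a-z]', ' ', s.lower()), which maps every character not in the allowed class to a space in one pass.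
import Mathlib
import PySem

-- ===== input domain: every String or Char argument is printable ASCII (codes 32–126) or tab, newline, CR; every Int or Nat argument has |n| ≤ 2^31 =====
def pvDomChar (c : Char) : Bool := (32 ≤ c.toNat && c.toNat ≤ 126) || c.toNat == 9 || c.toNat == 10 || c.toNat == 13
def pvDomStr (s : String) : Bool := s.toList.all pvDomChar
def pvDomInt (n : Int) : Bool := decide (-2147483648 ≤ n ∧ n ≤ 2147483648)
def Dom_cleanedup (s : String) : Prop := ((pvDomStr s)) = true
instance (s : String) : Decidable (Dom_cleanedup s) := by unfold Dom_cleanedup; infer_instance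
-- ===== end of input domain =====

-- B replaces A's char-by-char loop with a single regex substitution on s.lower(); return value equivalence.
-- ===== PORT A =====
-- 'for character in s.lower(): cleantext += character if character in letters else " "'
def cleanedup (s : String) : String :=
  let letters : List Char := "@abcdefghijklmnopqrstuvwxyz".toList
  String.ofList ((PySem.Str.lower s).toList.foldl
    (fun cleantext character =>
      cleantext ++ [if letters.contains character then character else ' ']) [])

-- ===== PORT B =====
-- re.sub(r'[^@a-z]', ' ', s.lower()): the regex engine replaces each char outside the class [@a-z] by ' '.
def cleanedup_alt (s : String) : String :=
  String.ofList ((PySem.Str.lower s).toList.map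
    (fun c => if c == '@' || ('a' ≤ c && c ≤ 'z') then c else ' '))

-- ===== PRECONDITION & SPEC =====
def Spec_cleanedup (s : String) (out : String) : Prop := out = cleanedup_alt s
instance (s : String) (out : String) : Decidable (Spec_cleanedup s out) := by unfold Spec_cleanedup; infer_instance

-- ===== CLAIM (what is proved, stated in full; the proofs are below) =====
def Claim_equal_cleanedup : Prop := ∀ (s : String), Dom_cleanedup s → Spec_cleanedup s (cleanedup s)

-- ===== LEMMAS AND PROOFS =====
lemma class_eq (c : Char) :
    (("@abcdefghijklmnopqrstuvwxyz".toList.contains c))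
      = (c == '@' || ('a' ≤ c && c ≤ 'z')) := by
  have hl : "@abcdefghijklmnopqrstuvwxyz".toList = ['@', 'a', 'b', 'c', 'd', 'e', 'f', 'g', 'h', 'i', 'j', 'k', 'l', 'm', 'n', 'o', 'p', 'q', 'r', 's', 't', 'u', 'v', 'w', 'x', 'y', 'z'] := rfl
  have hv64 : ('@'.val.toNat) = 64 := rfl
  have hv97 : ('a'.val.toNat) = 97 := rfl
  have hv98 : ('b'.val.toNat) = 98 := rfl
  have hv99 : ('c'.val.toNat) = 99 := rfl
  have hv100 : ('d'.val.toNat) = 100 := rfl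
  have hv101 : ('e'.val.toNat) = 101 := rfl
  have hv102 : ('f'.val.toNat) = 102 := rfl
  have hv103 : ('g'.val.toNat) = 103 := rfl
  have hv104 : ('h'.val.toNat) = 104 := rfl
  have hv105 : ('i'.val.toNat) = 105 := rfl
  have hv106 : ('j'.val.toNat) = 106 := rfl
  have hv107 : ('k'.val.toNat) = 107 := rfl
  have hv108 : ('l'.val.toNat) = 108 := rfl
  have hv109 : ('m'.val.toNat) = 109 := rfl
  have hv110 : ('n'.val.toNat) = 110 := rfl
  have hv111 : ('o'.val.toNat) = 111 := rfl
  have hv112 : ('p'.val.toNat) = 112 := rfl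
  have hv113 : ('q'.val.toNat) = 113 := rfl
  have hv114 : ('r'.val.toNat) = 114 := rfl
  have hv115 : ('s'.val.toNat) = 115 := rfl
  have hv116 : ('t'.val.toNat) = 116 := rfl
  have hv117 : ('u'.val.toNat) = 117 := rfl
  have hv118 : ('v'.val.toNat) = 118 := rfl
  have hv119 : ('w'.val.toNat) = 119 := rfl
  have hv120 : ('x'.val.toNat) = 120 := rfl
  have hv121 : ('y'.val.toNat) = 121 := rfl
  have hv122 : ('z'.val.toNat) = 122 := rfl
  rw [hl, Bool.eq_iff_iff]
  simp only [List.contains_eq_mem, Bool.or_eq_true, Bool.and_eq_true,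
    beq_iff_eq, decide_eq_true_eq, List.mem_cons, List.not_mem_nil, or_false,
    Char.le_def, UInt32.le_iff_toNat_le, Char.ext_iff, UInt32.ext_iff, hv64, hv97, hv98, hv99, hv100, hv101, hv102, hv103, hv104, hv105, hv106, hv107, hv108, hv109, hv110, hv111, hv112, hv113, hv114, hv115, hv116, hv117, hv118, hv119, hv120, hv121, hv122]
  omega

-- ===== VERDICT (by name: the statement is the Claim_ definition above) =====
theorem cleanedup_spec : Claim_equal_cleanedup := by
  intro s _
  unfold Spec_cleanedup cleanedup cleanedup_alt
  simp only [PySem.List.foldl_append_singleton_eq_map, List.nil_append]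
  congr 1
  apply List.map_congr_left
  intro c _
  rw [class_eq c]
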